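-- pv_equiv track=rewrite | github.com/pku-sixing/IJCAI2021-HITA-Graph | table2seq/t2s_data_utils.py | restore_field_copy_example
-- ===== SOURCE A (Python) =====
-- def restore_field_copy_example(field_values, src, tgt, has_sos=True):
--     if field_values is None:
--         return restore_pointer_copy_example(src, tgt, has_sos)
--     field_values = field_values.split()
--     src = src.split()
--     tgt = tgt.split()
--     src_map = dict()
--     offset = 1 if has_sos else 0
--     for i, word in enumerate(src):
--         src_map['<src_%d>' % (i + offset)] = word
--     table_offset = 0
--     for i, word in enumerate(field_values):
--         src_map['<field_%d>' % (i + table_offset)] = word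
--
--     for i, word in enumerate(tgt):
--         tgt[i] = src_map.get(word, word)
--     return ' '.join(tgt)
--
-- def restore_pointer_copy_example(src, tgt, has_sos=True):
--     src = src.split()
--     tgt = tgt.split()
--     src_map = dict()
--     offset = 1 if has_sos else 0
--     for i, word in enumerate(src):
--         src_map['<src_%d>' % (i + offset)] = word
--     for i, word in enumerate(tgt):
--         tgt[i] = src_map.get(word, word)
--     return ' '.join(tgt)
-- ===== SOURCE B (Python) =====
-- def _parse_canonical_nat(body):
--     """Value of a canonical decimal numeral (digits only, no leading zero unless exactly "0"), else None."""
--     if not body.isdigit():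
--         return None
--     if body.startswith('0') and len(body) > 1:
--         return None
--     n = 0
--     for c in body:
--         n = 10 * n + (ord(c) - 48)
--     return n
--
--
-- def _match_placeholder(tok, prefix, words, offset):
--     """words[N - offset] if tok is '<prefix>N>' with canonical N and N - offset in range, else None."""
--     if not (tok.startswith(prefix) and tok.endswith('>')):
--         return None
--     n = _parse_canonical_nat(tok[len(prefix):-1])
--     if n is None:
--         return None
--     i = n - offset
--     if 0 <= i < len(words):
--         return words[i]
--     return None
--
--
-- def restore_field_copy_example(field_values, src, tgt, has_sos=True):
--     swords = src.split()
--     fwords = None if field_values is None else field_values.split()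
--     offset = 1 if has_sos else 0
--     out = []
--     for tok in tgt.split():
--         r = _match_placeholder(tok, '<src_', swords, offset)
--         if r is None and fwords is not None:
--             r = _match_placeholder(tok, '<field_', fwords, 0)
--         out.append(tok if r is None else r)
--     return ' '.join(out)
-- ===== Notes on version B (the rewrite author's own statement) =====
-- stated objective: alternative
-- what changed: Instead of pre-building a dict of all '<src_N>'/'<field_N>' placeholder keys and looking every target token up in it, B pattern-matches each target token directly: it checks prefix/suffix, parses the numeral with a validating Horner loop that rejects non-canonical forms (sign, leading zeros), and indexes the split source/field list.
import Mathlib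
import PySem

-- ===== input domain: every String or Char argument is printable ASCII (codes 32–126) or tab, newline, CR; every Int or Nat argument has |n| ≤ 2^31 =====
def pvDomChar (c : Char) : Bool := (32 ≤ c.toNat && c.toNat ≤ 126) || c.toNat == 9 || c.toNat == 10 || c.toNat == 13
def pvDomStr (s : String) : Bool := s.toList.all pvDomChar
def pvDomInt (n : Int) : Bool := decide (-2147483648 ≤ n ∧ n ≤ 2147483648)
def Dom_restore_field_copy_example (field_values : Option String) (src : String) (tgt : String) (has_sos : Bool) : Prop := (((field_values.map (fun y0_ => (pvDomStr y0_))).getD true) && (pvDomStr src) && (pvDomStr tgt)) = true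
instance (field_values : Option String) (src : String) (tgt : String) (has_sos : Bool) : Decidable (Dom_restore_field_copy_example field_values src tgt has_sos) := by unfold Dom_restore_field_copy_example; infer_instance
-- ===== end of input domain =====

-- B replaces A's precomputed placeholder dict by direct per-token pattern matching ('<src_N>' / '<field_N>'
-- parsed with a validating Horner loop); alternative structure of the same cost, return value proved identical.

-- ===== PORT A =====
def restore_pointer_copy_example (src : String) (tgt : String) (has_sos : Bool) : String :=
  let srcW := PySem.Str.split₀ src
  let tgtW := PySem.Str.split₀ tgt
  let offset : Int := if has_sos then 1 else 0
  let srcMap := (PySem.List.enumerate srcW).foldl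
    (fun (d : PySem.Dict String String) iw =>
      d.insert ("<src_" ++ PySem.Int.toStr (iw.1 + offset) ++ ">") iw.2) PySem.Dict.empty
  let tgtW2 := tgtW.map (fun w => srcMap.getD w w)
  PySem.Str.join " " tgtW2

def restore_field_copy_example (field_values : Option String) (src : String) (tgt : String) (has_sos : Bool) : String :=
  match field_values with
  | none => restore_pointer_copy_example src tgt has_sos
  | some fv =>
    let fieldW := PySem.Str.split₀ fv
    let srcW := PySem.Str.split₀ src
    let tgtW := PySem.Str.split₀ tgt
    let offset : Int := if has_sos then 1 else 0
    let srcMap := (PySem.List.enumerate srcW).foldl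
      (fun (d : PySem.Dict String String) iw =>
        d.insert ("<src_" ++ PySem.Int.toStr (iw.1 + offset) ++ ">") iw.2) PySem.Dict.empty
    let tableOffset : Int := 0
    let srcMap2 := (PySem.List.enumerate fieldW).foldl
      (fun (d : PySem.Dict String String) iw =>
        d.insert ("<field_" ++ PySem.Int.toStr (iw.1 + tableOffset) ++ ">") iw.2) srcMap
    let tgtW2 := tgtW.map (fun w => srcMap2.getD w w)
    PySem.Str.join " " tgtW2

-- ===== PORT B =====
-- value of a canonical decimal numeral (digits only, no leading zero unless exactly "0"), else none
def pvParseCanonicalNat (body : String) : Option Int :=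
  if !PySem.Str.strIsdigit body then none
  else if PySem.Str.startswith body "0" && decide (1 < PySem.Str.len body) then none
  else some (body.toList.foldl (fun n c => 10 * n + ((c.toNat : Int) - 48)) 0)

-- words[N - offset] if tok is '<pre>N>' with canonical N and N - offset in range, else none
def pvMatchPlaceholder (tok : String) (pre : String) (words : List String) (offset : Int) : Option String :=
  if !(PySem.Str.startswith tok pre && PySem.Str.endswith tok ">") then none
  else
    match pvParseCanonicalNat (PySem.Str.slice tok (some (PySem.Str.len pre)) (some (-1))) with
    | none => none
    | some n =>
      let i := n - offset
      if 0 ≤ i ∧ i < (words.length : Int) then PySem.List.pyGet? words i else none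

def restore_field_copy_example_alt (field_values : Option String) (src : String) (tgt : String) (has_sos : Bool) : String :=
  let swords := PySem.Str.split₀ src
  let fwords := field_values.map PySem.Str.split₀
  let offset : Int := if has_sos then 1 else 0
  let out := (PySem.Str.split₀ tgt).foldl (fun acc tok =>
    let r := pvMatchPlaceholder tok "<src_" swords offset
    let r2 := match r, fwords with
      | none, some fw => pvMatchPlaceholder tok "<field_" fw 0
      | r, _ => r
    acc ++ [r2.getD tok]) []
  PySem.Str.join " " out

-- ===== PRECONDITION & SPEC =====
def Spec_restore_field_copy_example (field_values : Option String) (src : String) (tgt : String) (has_sos : Bool) (out : String) : Prop := out = restore_field_copy_example_alt field_values src tgt has_sos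
instance (field_values : Option String) (src : String) (tgt : String) (has_sos : Bool) (out : String) : Decidable (Spec_restore_field_copy_example field_values src tgt has_sos out) := by unfold Spec_restore_field_copy_example; infer_instance

-- ===== CLAIM (what is proved, stated in full; the proofs are below) =====
def Claim_equal_restore_field_copy_example : Prop := ∀ (field_values : Option String) (src : String) (tgt : String) (has_sos : Bool), Dom_restore_field_copy_example field_values src tgt has_sos → Spec_restore_field_copy_example field_values src tgt has_sos (restore_field_copy_example field_values src tgt has_sos)

-- ===== LEMMAS AND PROOFS =====

theorem pv_char_eq_of_toNat (c d : Char) (h : c.toNat = d.toNat) : c = d :=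
  Char.ext (UInt32.toNat_inj.mp h)

theorem pv_isdigit_iff (c : Char) : PySem.Chars.isdigit c = true ↔ (48 ≤ c.toNat ∧ c.toNat ≤ 57) := by
  have h0 : '0'.val.toNat = 48 := by decide
  have h9 : '9'.val.toNat = 57 := by decide
  simp only [PySem.Chars.isdigit, Bool.and_eq_true, decide_eq_true_eq]
  rw [Char.le_def, Char.le_def, UInt32.le_iff_toNat_le, UInt32.le_iff_toNat_le, h0, h9]
  exact Iff.rfl

theorem pv_digitChar_toNat (k : Nat) (h : k < 10) : (Nat.digitChar k).toNat = 48 + k := by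
  interval_cases k <;> decide

theorem pv_isdigit_digitChar (k : Nat) (h : k < 10) : PySem.Chars.isdigit (Nat.digitChar k) = true := by
  rw [pv_isdigit_iff, pv_digitChar_toNat k h]; omega

theorem pv_digitChar_of_isdigit (c : Char) (h : PySem.Chars.isdigit c = true) :
    Nat.digitChar (c.toNat - 48) = c := by
  rw [pv_isdigit_iff] at h
  apply pv_char_eq_of_toNat
  rw [pv_digitChar_toNat _ (by omega)]
  omega

-- canonical decimal representation, most significant digit first
def pvDecRep (n : Nat) : List Char :=
  if h : n < 10 then [Nat.digitChar n] else pvDecRep (n / 10) ++ [Nat.digitChar (n % 10)]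
  termination_by n
  decreasing_by exact Nat.div_lt_self (by omega) (by omega)

theorem pvDecRep_lt {n : Nat} (h : n < 10) : pvDecRep n = [Nat.digitChar n] := by
  rw [pvDecRep]; simp [h]

theorem pvDecRep_ge {n : Nat} (h : ¬ n < 10) :
    pvDecRep n = pvDecRep (n / 10) ++ [Nat.digitChar (n % 10)] := by
  rw [pvDecRep]; simp [h]

theorem pv_core_shift (f : Nat) : ∀ (n : Nat) (l : List Char),
    Nat.toDigitsCore 10 f n l = Nat.toDigitsCore 10 f n [] ++ l := by
  induction f with
  | zero => intro n l; simp [Nat.toDigitsCore]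
  | succ f ih =>
    intro n l
    simp only [Nat.toDigitsCore]
    by_cases h : n / 10 = 0
    · simp [h]
    · simp only [h, if_false]
      rw [ih (n / 10) ((n % 10).digitChar :: l), ih (n / 10) [(n % 10).digitChar]]
      simp

theorem pv_core_fuel : ∀ (n f f' : Nat), n < f → n < f' →
    Nat.toDigitsCore 10 f n [] = Nat.toDigitsCore 10 f' n [] := by
  intro n
  induction n using Nat.strong_induction_on with
  | _ n ih =>
    intro f f' hf hf'
    match f, f' with
    | f + 1, f' + 1 =>
      simp only [Nat.toDigitsCore]
      by_cases h : n / 10 = 0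
      · simp [h]
      · simp only [h, if_false]
        rw [pv_core_shift f (n / 10) [(n % 10).digitChar],
            pv_core_shift f' (n / 10) [(n % 10).digitChar]]
        have hlt : n / 10 < n := Nat.div_lt_self (by omega) (by omega)
        rw [ih (n / 10) hlt f f' (by omega) (by omega)]

theorem pv_toDigits_eq_decRep (n : Nat) : Nat.toDigits 10 n = pvDecRep n := by
  induction n using Nat.strong_induction_on with
  | _ n ih =>
    show Nat.toDigitsCore 10 (n + 1) n [] = pvDecRep n
    simp only [Nat.toDigitsCore]
    by_cases h : n / 10 = 0
    · have h10 : n < 10 := by omega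
      rw [pvDecRep_lt h10]
      simp [h, Nat.mod_eq_of_lt h10]
    · have h10 : ¬ n < 10 := by omega
      simp only [h, if_false]
      have hlt : n / 10 < n := Nat.div_lt_self (by omega) (by omega)
      rw [pv_core_shift n (n / 10) [(n % 10).digitChar],
          pv_core_fuel (n / 10) n (n / 10 + 1) (by omega) (by omega),
          ← Nat.toDigits, ih (n / 10) hlt, pvDecRep_ge h10]

theorem pvDecRep_ne_nil (n : Nat) : pvDecRep n ≠ [] := by
  by_cases h : n < 10
  · rw [pvDecRep_lt h]; simp
  · rw [pvDecRep_ge h]; simp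

theorem pvDecRep_digits (n : Nat) : ∀ c ∈ pvDecRep n, PySem.Chars.isdigit c = true := by
  induction n using Nat.strong_induction_on with
  | _ n ih =>
    by_cases h : n < 10
    · rw [pvDecRep_lt h]
      intro c hc
      simp at hc
      subst hc
      exact pv_isdigit_digitChar n h
    · rw [pvDecRep_ge h]
      intro c hc
      rcases List.mem_append.mp hc with hc | hc
      · exact ih (n / 10) (Nat.div_lt_self (by omega) (by omega)) c hc
      · simp at hc
        subst hc
        exact pv_isdigit_digitChar _ (Nat.mod_lt _ (by omega))

theorem pvDecRep_zero : pvDecRep 0 = ['0'] := by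
  rw [pvDecRep_lt (by omega)]; decide

theorem pvDecRep_no_leading_zero (n : Nat) (hn : n ≠ 0) (t : List Char) :
    pvDecRep n ≠ '0' :: t := by
  induction n using Nat.strong_induction_on generalizing t with
  | _ n ih =>
    by_cases h : n < 10
    · rw [pvDecRep_lt h]
      intro hc
      have h1 : Nat.digitChar n = '0' := by injection hc
      have := congrArg Char.toNat h1
      rw [pv_digitChar_toNat n h] at this
      have : (48 + n) = 48 := by simpa using this
      omega
    · rw [pvDecRep_ge h]
      intro hc
      obtain ⟨c, t', he⟩ : ∃ c t', pvDecRep (n / 10) = c :: t' := by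
        cases hd : pvDecRep (n / 10) with
        | nil => exact absurd hd (pvDecRep_ne_nil _)
        | cons c t' => exact ⟨c, t', rfl⟩
      rw [he] at hc
      simp only [List.cons_append] at hc
      have hc0 : c = '0' := by injection hc
      subst hc0
      exact ih (n / 10) (Nat.div_lt_self (by omega) (by omega)) (hn := by omega) t' he

def pvNatH (body : List Char) : Nat := body.foldl (fun a c => 10 * a + (c.toNat - 48)) 0

theorem pv_hornerAux (n : Nat) : ∀ a : Nat,
    (pvDecRep n).foldl (fun a c => 10 * a + (c.toNat - 48)) a = a * 10 ^ (pvDecRep n).length + n := by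
  induction n using Nat.strong_induction_on with
  | _ n ih =>
    intro a
    by_cases h : n < 10
    · rw [pvDecRep_lt h]
      simp [List.foldl, pv_digitChar_toNat n h]
      omega
    · rw [pvDecRep_ge h]
      rw [List.foldl_append]
      rw [ih (n / 10) (Nat.div_lt_self (by omega) (by omega)) a]
      simp only [List.foldl, List.length_append, List.length_cons, List.length_nil]
      rw [pv_digitChar_toNat _ (Nat.mod_lt _ (by omega))]
      have : a * 10 ^ ((pvDecRep (n / 10)).length + (0 + 1)) = (a * 10 ^ (pvDecRep (n / 10)).length) * 10 := by
        ring
      rw [this]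
      omega

theorem pvNatH_decRep (n : Nat) : pvNatH (pvDecRep n) = n := by
  have := pv_hornerAux n 0
  simpa [pvNatH] using this

theorem pvDecRep_inj {m n : Nat} (h : pvDecRep m = pvDecRep n) : m = n := by
  have := congrArg pvNatH h
  rwa [pvNatH_decRep, pvNatH_decRep] at this

theorem pv_intH_eq : ∀ (body : List Char), (∀ c ∈ body, PySem.Chars.isdigit c = true) →
    ∀ a : Nat, body.foldl (fun n c => 10 * n + ((c.toNat : Int) - 48)) (a : Int)
      = ((body.foldl (fun a c => 10 * a + (c.toNat - 48)) a : Nat) : Int) := by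
  intro body
  induction body with
  | nil => intro _ a; simp
  | cons c t ih =>
    intro hd a
    have hc : 48 ≤ c.toNat := ((pv_isdigit_iff c).mp (hd c (by simp))).1
    simp only [List.foldl]
    have h1 : (10 * (a : Int) + ((c.toNat : Int) - 48)) = ((10 * a + (c.toNat - 48) : Nat) : Int) := by
      push_cast [Nat.sub_add_cancel]
      omega
    rw [h1, ih (fun c hc => hd c (by simp [hc]))]

theorem pv_canon : ∀ (body : List Char), body ≠ [] →
    (∀ c ∈ body, PySem.Chars.isdigit c = true) →
    (∀ t, body = '0' :: t → t = []) →
    pvDecRep (pvNatH body) = body := by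
  intro body
  induction body using List.reverseRecOn with
  | nil => intro h; exact absurd rfl h
  | append_singleton bs c ih =>
    intro _ hd hz
    have hdc : PySem.Chars.isdigit c = true := hd c (by simp)
    have hcb : 48 ≤ c.toNat ∧ c.toNat ≤ 57 := (pv_isdigit_iff c).mp hdc
    have hH : pvNatH (bs ++ [c]) = 10 * pvNatH bs + (c.toNat - 48) := by
      simp [pvNatH, List.foldl_append]
    by_cases hbs : bs = []
    · subst hbs
      have hv : pvNatH ([] ++ [c]) = c.toNat - 48 := by simp [pvNatH]
      rw [hv, pvDecRep_lt (by omega)]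
      rw [List.nil_append]
      rw [pv_digitChar_of_isdigit c hdc]
    · have hd' : ∀ x ∈ bs, PySem.Chars.isdigit x = true :=
        fun x hx => hd x (List.mem_append_left _ hx)
      have hz0 : ∀ t, bs ≠ '0' :: t := by
        intro t ht
        have := hz (t ++ [c]) (by rw [ht]; simp)
        simp at this
      have ihh := ih hbs hd' (fun t ht => absurd ht (hz0 t))
      have hpos : 1 ≤ pvNatH bs := by
        rcases Nat.eq_zero_or_pos (pvNatH bs) with h0 | h
        · rw [h0, pvDecRep_zero] at ihh
          exact absurd ihh.symm (hz0 [])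
        · exact h
      rw [hH, pvDecRep_ge (by omega)]
      have hdiv : (10 * pvNatH bs + (c.toNat - 48)) / 10 = pvNatH bs := by omega
      have hmod : (10 * pvNatH bs + (c.toNat - 48)) % 10 = c.toNat - 48 := by omega
      rw [hdiv, hmod, ihh, pv_digitChar_of_isdigit c hdc]

-- key-string helpers used by the proofs
def pvSrcKey (offset : Int) (p : Int × String) : String := "<src_" ++ PySem.Int.toStr (p.1 + offset) ++ ">"
def pvFldKey (p : Int × String) : String := "<field_" ++ PySem.Int.toStr (p.1 + 0) ++ ">"

theorem pv_toList_key (pre : String) (n : Int) (hn : 0 ≤ n) :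
    (pre ++ PySem.Int.toStr n ++ ">").toList = pre.toList ++ pvDecRep n.toNat ++ ['>'] := by
  rw [String.toList_append, String.toList_append, PySem.Int.toList_toStr]
  have : PySem.Int.toChars n = pvDecRep n.toNat := by
    rw [PySem.Int.toChars, if_neg (by omega), pv_toDigits_eq_decRep]
  rw [this]
  simp

theorem pv_slice_key (p mid : List Char) :
    PySem.Chars.slice (p ++ mid ++ ['>']) (some (p.length : Int)) (some (-1)) = mid := by
  rw [PySem.Chars.slice_eq_listSlice]
  have hlen : (p ++ mid ++ ['>']).length = p.length + mid.length + 1 := by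
    simp only [List.length_append, List.length_cons, List.length_nil]
  simp only [PySem.List.slice, PySem.List.clampIdx, hlen]
  have h1 : ¬ ((p.length : Int) < 0) := by omega
  have h2 : ((-1 : Int) < 0) := by omega
  have h3 : ¬ ((p.length + mid.length + 1 : Nat) : Int) + (-1) < 0 := by omega
  simp only [h1, if_false, h2, if_true, h3]
  have h4 : min (p.length : Int).toNat (p.length + mid.length + 1) = p.length := by omega
  have h5 : (((p.length + mid.length + 1 : Nat) : Int) + (-1)).toNat = p.length + mid.length := by omega
  rw [h4, h5]
  have h6 : p ++ mid ++ ['>'] = p ++ (mid ++ ['>']) := by simp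
  rw [h6, List.drop_left]
  have h7 : p.length + mid.length - p.length = mid.length := by omega
  rw [h7, List.take_left]

theorem pv_match_of_key (tok pre : String) (words : List String) (offset : Int)
    (hoff : 0 ≤ offset) (k : Nat) (hk : k < words.length)
    (h : tok.toList = pre.toList ++ pvDecRep ((k : Int) + offset).toNat ++ ['>']) :
    pvMatchPlaceholder tok pre words offset = some words[k] := by
  have hm0 : (0 : Int) ≤ (k : Int) + offset := by omega
  set m : Nat := ((k : Int) + offset).toNat with hm
  have hsw : PySem.Str.startswith tok pre = true := by
    rw [PySem.Str.startswith, PySem.Chars.startswith_iff, h]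
    exact ⟨pvDecRep m ++ ['>'], by simp⟩
  have hew : PySem.Str.endswith tok ">" = true := by
    rw [PySem.Str.endswith, PySem.Chars.endswith_iff, h]
    refine ⟨pre.toList ++ pvDecRep m, ?_⟩
    have hgt : (">" : String).toList = ['>'] := by decide
    simp [hgt]
  have hbody : (PySem.Str.slice tok (some (PySem.Str.len pre)) (some (-1))).toList = pvDecRep m := by
    rw [PySem.Str.slice]
    rw [String.toList_ofList]
    rw [h, PySem.Str.len]
    exact pv_slice_key pre.toList (pvDecRep m)
  rw [pvMatchPlaceholder]
  rw [hsw, hew]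
  simp only [Bool.and_self, Bool.not_true, Bool.false_eq_true, if_false]
  have hparse : pvParseCanonicalNat (PySem.Str.slice tok (some (PySem.Str.len pre)) (some (-1))) = some ((k : Int) + offset) := by
    rw [pvParseCanonicalNat]
    have hdig : PySem.Str.strIsdigit (PySem.Str.slice tok (some (PySem.Str.len pre)) (some (-1))) = true := by
      rw [PySem.Str.strIsdigit, hbody, PySem.Chars.strIsdigit]
      simp only [Bool.and_eq_true, List.all_eq_true]
      exact ⟨by simpa using pvDecRep_ne_nil m, fun c hc => pvDecRep_digits m c hc⟩
    rw [hdig]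
    simp only [Bool.not_true, Bool.false_eq_true, if_false]
    have hlead : (PySem.Str.startswith (PySem.Str.slice tok (some (PySem.Str.len pre)) (some (-1))) "0"
        && decide (1 < PySem.Str.len (PySem.Str.slice tok (some (PySem.Str.len pre)) (some (-1))))) = false := by
      by_cases hm0' : m = 0
      · apply Bool.and_eq_false_iff.mpr
        right
        rw [PySem.Str.len, hbody, hm0', pvDecRep_zero]
        simp
      · apply Bool.and_eq_false_iff.mpr
        left
        rw [PySem.Str.startswith, PySem.Chars.startswith]
        rw [hbody]
        have h0 : ("0" : String).toList = ['0'] := by decide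
        rw [h0]
        cases hd : pvDecRep m with
        | nil => exact absurd hd (pvDecRep_ne_nil m)
        | cons c t =>
          have hc0 : c ≠ '0' := by
            intro hc; subst hc
            exact pvDecRep_no_leading_zero m hm0' t hd
          simp only [List.isPrefixOf, Bool.and_eq_false_iff, beq_eq_false_iff_ne, ne_eq]
          left
          exact fun hh => hc0 hh.symm
    rw [hlead]
    simp only [Bool.false_eq_true, if_false]
    have hfold : (PySem.Str.slice tok (some (PySem.Str.len pre)) (some (-1))).toList.foldl
        (fun n c => 10 * n + ((c.toNat : Int) - 48)) 0 = (k : Int) + offset := by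
      rw [hbody]
      have := pv_intH_eq (pvDecRep m) (pvDecRep_digits m) 0
      simp only [Nat.cast_zero] at this
      rw [this]
      show ((pvNatH (pvDecRep m) : Nat) : Int) = (k : Int) + offset
      rw [pvNatH_decRep]
      omega
    rw [hfold]
  rw [hparse]
  have hi : (k : Int) + offset - offset = (k : Int) := by omega
  simp only [hi]
  rw [if_pos ⟨by omega, by omega⟩]
  rw [PySem.List.pyGet?_natCast]
  exact List.getElem?_eq_getElem hk

theorem pv_key_of_match (tok pre : String) (words : List String) (offset : Int)
    (hoff : 0 ≤ offset) (w : String)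
    (h : pvMatchPlaceholder tok pre words offset = some w) :
    ∃ k : Nat, k < words.length ∧ w = words[k]! ∧
      tok.toList = pre.toList ++ pvDecRep ((k : Int) + offset).toNat ++ ['>'] := by
  rw [pvMatchPlaceholder] at h
  by_cases hc : (PySem.Str.startswith tok pre && PySem.Str.endswith tok ">") = true
  · rw [hc] at h
    simp only [Bool.not_true, Bool.false_eq_true, if_false] at h
    obtain ⟨hsw, hew⟩ := Bool.and_eq_true_iff.mp hc
    cases hp : pvParseCanonicalNat (PySem.Str.slice tok (some (PySem.Str.len pre)) (some (-1))) with
    | none => rw [hp] at h; simp at h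
    | some n =>
      rw [hp] at h
      simp only at h
      by_cases hg : (0 ≤ n - offset ∧ n - offset < (words.length : Int))
      · rw [if_pos hg] at h
        -- decompose tok
        obtain ⟨rest, hrest⟩ := (PySem.Chars.startswith_iff _ _).mp hsw
        obtain ⟨init, hinit⟩ := (PySem.Chars.endswith_iff _ _).mp hew
        have hgt : (">" : String).toList = ['>'] := by decide
        rw [hgt] at hinit
        -- parse facts
        rw [pvParseCanonicalNat] at hp
        by_cases hdig : PySem.Str.strIsdigit (PySem.Str.slice tok (some (PySem.Str.len pre)) (some (-1))) = true
        · rw [hdig] at hp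
          simp only [Bool.not_true, Bool.false_eq_true, if_false] at hp
          by_cases hlead : (PySem.Str.startswith (PySem.Str.slice tok (some (PySem.Str.len pre)) (some (-1))) "0"
              && decide (1 < PySem.Str.len (PySem.Str.slice tok (some (PySem.Str.len pre)) (some (-1))))) = true
          · rw [hlead] at hp; simp at hp
          · rw [Bool.not_eq_true] at hlead
            rw [hlead] at hp
            simp only [Bool.false_eq_true, if_false, Option.some.injEq] at hp
            -- body as a list
            set bodyL := (PySem.Str.slice tok (some (PySem.Str.len pre)) (some (-1))).toList with hbodyL
            have hbody_eq : bodyL = PySem.Chars.slice tok.toList (some (PySem.Str.len pre)) (some (-1)) := by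
              rw [hbodyL, PySem.Str.slice, String.toList_ofList]
            have hdigL : bodyL ≠ [] ∧ ∀ c ∈ bodyL, PySem.Chars.isdigit c = true := by
              rw [PySem.Str.strIsdigit, ← hbodyL, PySem.Chars.strIsdigit] at hdig
              simp only [Bool.and_eq_true, List.all_eq_true] at hdig
              exact ⟨by simpa using hdig.1, hdig.2⟩
            -- rest is nonempty: tok = pre ++ mid ++ ['>']
            have hrestne : rest ≠ [] := by
              intro hr
              apply hdigL.1
              have hslice_nil : ∀ (l : List Char), PySem.List.slice l (some (l.length : Int)) (some (-1)) = [] := by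
                intro l
                show List.take _ (List.drop (PySem.List.clampIdx l.length (l.length : Int)) l) = []
                have hc : PySem.List.clampIdx l.length (l.length : Int) = l.length := by
                  simp [PySem.List.clampIdx]
                rw [hc, List.drop_length, List.take_nil]
              have htoklen : tok.toList = pre.toList := by rw [← hrest, hr, List.append_nil]
              rw [hbody_eq, PySem.Chars.slice_eq_listSlice, PySem.Str.len, htoklen]
              exact hslice_nil pre.toList
            obtain ⟨mid, hmid⟩ : ∃ mid, rest = mid ++ ['>'] := by
              rcases List.eq_nil_or_concat rest with hr | ⟨mid, a, hma⟩
              · exact absurd hr hrestne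
              · rw [List.concat_eq_append] at hma
                have h1 : tok.toList.getLast? = some '>' := by
                  rw [← hinit]
                  simp [List.getLast?_append]
                rw [← hrest, hma] at h1
                have h2 : (pre.toList ++ (mid ++ [a])).getLast? = some a := by
                  simp [List.getLast?_append]
                have ha : a = '>' := by
                  have h3 := h2.symm.trans h1
                  injection h3
                exact ⟨mid, by rw [hma, ha]⟩
            have htok : tok.toList = pre.toList ++ mid ++ ['>'] := by
              rw [← hrest, hmid]; simp
            have hmidbody : bodyL = mid := by
              rw [hbody_eq, htok, PySem.Str.len]
              exact pv_slice_key pre.toList mid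
            -- canonical value
            have hzlead : ∀ t, mid = '0' :: t → t = [] := by
              intro t ht
              by_contra htne
              have hB : decide (1 < PySem.Str.len (PySem.Str.slice tok (some (PySem.Str.len pre)) (some (-1)))) = true := by
                rw [decide_eq_true_eq, PySem.Str.len, ← hbodyL, hmidbody, ht]
                cases t with
                | nil => exact absurd rfl htne
                | cons x xs =>
                  simp only [List.length_cons]
                  omega
              have hsw0 : PySem.Str.startswith (PySem.Str.slice tok (some (PySem.Str.len pre)) (some (-1))) "0" = true := by
                rw [PySem.Str.startswith, ← hbodyL, hmidbody, ht]
                have h0 : ("0" : String).toList = ['0'] := by decide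
                rw [h0, PySem.Chars.startswith_iff]
                exact ⟨t, rfl⟩
              rw [hsw0, hB] at hlead
              simp at hlead
            have hcanon : pvDecRep (pvNatH mid) = mid :=
              pv_canon mid (by rw [← hmidbody]; exact hdigL.1)
                (fun c hc => hdigL.2 c (by rw [hmidbody]; exact hc)) hzlead
            have hn : n = ((pvNatH mid : Nat) : Int) := by
              rw [← hp, hmidbody]
              have := pv_intH_eq mid (fun c hc => hdigL.2 c (by rw [hmidbody]; exact hc)) 0
              simpa [pvNatH] using this
            refine ⟨(n - offset).toNat, by omega, ?_, ?_⟩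
            · have : PySem.List.pyGet? words (n - offset) = some w := h
              rw [show (n - offset) = (((n - offset).toNat : Nat) : Int) by omega] at this
              rw [PySem.List.pyGet?_natCast] at this
              rw [List.getElem?_eq_getElem (by omega)] at this
              have hw : words[(n - offset).toNat] = w := by injection this
              rw [← hw]
              rw [List.getElem!_eq_getElem?_getD]
              rw [List.getElem?_eq_getElem (by omega)]
              simp
            · rw [htok]
              have hnn : (((n - offset).toNat : Int) + offset).toNat = pvNatH mid := by omega
              rw [hnn, hcanon]
        · rw [Bool.not_eq_true] at hdig
          rw [hdig] at hp
          simp at hp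
      · rw [if_neg hg] at h
        simp at h
  · rw [Bool.not_eq_true] at hc
    rw [hc] at h
    simp at h

theorem pv_match_nil (tok pre : String) (offset : Int) :
    pvMatchPlaceholder tok pre [] offset = none := by
  rw [pvMatchPlaceholder]
  split
  · rfl
  · split
    · rfl
    · simp only [List.length_nil, Nat.cast_zero]
      rw [if_neg (by omega)]

-- the dict A builds (field list may be empty, which also covers restore_pointer_copy_example)
def pvTheDict (srcW fldW : List String) (offset : Int) : PySem.Dict String String :=
  (PySem.List.enumerate fldW).foldl (fun d iw => d.insert (pvFldKey iw) iw.2)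
    ((PySem.List.enumerate srcW).foldl (fun d iw => d.insert (pvSrcKey offset iw) iw.2) PySem.Dict.empty)

theorem pv_key_inj (pre : String) (m n : Int) (hm : 0 ≤ m) (hn : 0 ≤ n)
    (h : (pre ++ PySem.Int.toStr m ++ ">") = (pre ++ PySem.Int.toStr n ++ ">")) : m = n := by
  have h2 := congrArg String.toList h
  rw [pv_toList_key pre m hm, pv_toList_key pre n hn] at h2
  rw [List.append_assoc, List.append_assoc] at h2
  have h3 := List.append_cancel_left h2
  have h4 := List.append_cancel_right h3
  have := pvDecRep_inj h4
  omega

theorem pv_src_ne_fld (s t : String) :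
    ("<src_" ++ s ++ ">") ≠ ("<field_" ++ t ++ ">") := by
  intro h
  have h2 := congrArg String.toList h
  rw [String.toList_append, String.toList_append, String.toList_append, String.toList_append] at h2
  have ha : ("<src_" : String).toList = ['<', 's', 'r', 'c', '_'] := by decide
  have hb : ("<field_" : String).toList = ['<', 'f', 'i', 'e', 'l', 'd', '_'] := by decide
  rw [ha, hb] at h2
  simp at h2

theorem pv_enumerate_nodup {α : Type} (xs : List α) (s : Int) :
    (PySem.List.enumerate xs s).Nodup := by
  have := PySem.List.pairwise_lt_enumerate xs s
  exact this.imp (fun h => by intro he; rw [he] at h; omega)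

theorem pv_items_theDict (srcW fldW : List String) (offset : Int) (hoff : 0 ≤ offset) :
    (pvTheDict srcW fldW offset).items =
      (PySem.List.enumerate srcW).map (fun p => (pvSrcKey offset p, p.2)) ++
      (PySem.List.enumerate fldW).map (fun p => (pvFldKey p, p.2)) := by
  have hfst : ∀ {β : Type} (xs : List β) (p : Int × β), p ∈ PySem.List.enumerate xs 0 → 0 ≤ p.1 := by
    intro β xs p hp
    obtain ⟨k, hk, hpe⟩ := (PySem.List.mem_enumerate_iff xs 0 p).mp hp
    rw [hpe]; simp
  have hsnodup : ((PySem.List.enumerate srcW).map (pvSrcKey offset)).Nodup := by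
    apply (pv_enumerate_nodup srcW 0).map_on
    intro p hp q hq he
    have hp0 := hfst srcW p hp
    have hq0 := hfst srcW q hq
    have h1 : p.1 + offset = q.1 + offset := pv_key_inj "<src_" _ _ (by omega) (by omega) he
    obtain ⟨k, hk, hpe⟩ := (PySem.List.mem_enumerate_iff srcW 0 p).mp hp
    obtain ⟨k', hk', hqe⟩ := (PySem.List.mem_enumerate_iff srcW 0 q).mp hq
    subst hpe; subst hqe
    simp only [Prod.mk.injEq] at h1 ⊢
    have hkk : k = k' := by omega
    subst hkk
    exact ⟨rfl, rfl⟩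
  have hfnodup : ((PySem.List.enumerate fldW).map pvFldKey).Nodup := by
    apply (pv_enumerate_nodup fldW 0).map_on
    intro p hp q hq he
    have hp0 := hfst fldW p hp
    have hq0 := hfst fldW q hq
    have h1 : p.1 + 0 = q.1 + 0 := pv_key_inj "<field_" _ _ (by omega) (by omega) he
    obtain ⟨k, hk, hpe⟩ := (PySem.List.mem_enumerate_iff fldW 0 p).mp hp
    obtain ⟨k', hk', hqe⟩ := (PySem.List.mem_enumerate_iff fldW 0 q).mp hq
    subst hpe; subst hqe
    simp only [Prod.mk.injEq] at h1 ⊢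
    have hkk : k = k' := by omega
    subst hkk
    exact ⟨rfl, rfl⟩
  have h1 : ((PySem.List.enumerate srcW).foldl
      (fun d iw => d.insert (pvSrcKey offset iw) iw.2) (PySem.Dict.empty : PySem.Dict String String)).items =
      (PySem.Dict.empty : PySem.Dict String String).items ++ (PySem.List.enumerate srcW).map (fun p => (pvSrcKey offset p, p.2)) :=
    PySem.Dict.items_foldl_insert_fresh _ _ _ _ (fun a _ => PySem.Dict.contains_empty _) hsnodup
  have hd1keys : ((PySem.List.enumerate srcW).foldl
      (fun d iw => d.insert (pvSrcKey offset iw) iw.2) (PySem.Dict.empty : PySem.Dict String String)).keys =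
      (PySem.List.enumerate srcW).map (pvSrcKey offset) := by
    show (((PySem.List.enumerate srcW).foldl
      (fun d iw => d.insert (pvSrcKey offset iw) iw.2) (PySem.Dict.empty : PySem.Dict String String)).items).map Prod.fst = _
    rw [h1]
    simp [PySem.Dict.empty, pvSrcKey]
  have hfresh : ∀ a ∈ PySem.List.enumerate fldW 0,
      (((PySem.List.enumerate srcW).foldl
        (fun d iw => d.insert (pvSrcKey offset iw) iw.2) (PySem.Dict.empty : PySem.Dict String String))).contains (pvFldKey a) = false := by
    intro a ha
    rw [PySem.Dict.contains_eq_decide_mem_keys, hd1keys]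
    simp only [decide_eq_false_iff_not, List.mem_map]
    rintro ⟨p, hp, hpe⟩
    exact pv_src_ne_fld _ _ hpe
  have h2 := PySem.Dict.items_foldl_insert_fresh (PySem.List.enumerate fldW 0) pvFldKey Prod.snd
      ((PySem.List.enumerate srcW).foldl (fun d iw => d.insert (pvSrcKey offset iw) iw.2) PySem.Dict.empty)
      hfresh hfnodup
  rw [pvTheDict]
  rw [h2, h1]
  simp [PySem.Dict.empty]

theorem pv_keys_nodup (srcW fldW : List String) (offset : Int) :
    (pvTheDict srcW fldW offset).keys.Nodup := by
  rw [pvTheDict]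
  exact PySem.Dict.nodup_keys_foldl_insert_key (PySem.List.enumerate fldW) pvFldKey (fun _ iw => iw.2) _
    (PySem.Dict.nodup_keys_foldl_insert_key (PySem.List.enumerate srcW) (pvSrcKey offset) (fun _ iw => iw.2) _
      PySem.Dict.nodup_keys_empty)

-- the per-token equivalence
theorem pv_token_eq (s f : List String) (off : Int) (hoff : off = 0 ∨ off = 1) (tok : String) :
    (pvTheDict s f off).getD tok tok =
      (match pvMatchPlaceholder tok "<src_" s off with
       | some w => w
       | none => (pvMatchPlaceholder tok "<field_" f 0).getD tok) := by
  have hoff0 : 0 ≤ off := by omega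
  cases h1 : pvMatchPlaceholder tok "<src_" s off with
  | some w =>
    obtain ⟨k, hk, hw, htok⟩ := pv_key_of_match tok "<src_" s off hoff0 w h1
    have htoks : tok = pvSrcKey off ((k : Int), s[k]) := by
      rw [← String.toList_inj]
      rw [htok, pvSrcKey]
      rw [pv_toList_key "<src_" ((k : Int) + off) (by omega)]
    have hmem : (tok, s[k]) ∈ (pvTheDict s f off).items := by
      rw [pv_items_theDict s f off hoff0]
      apply List.mem_append_left
      apply List.mem_map.mpr
      refine ⟨((k : Int), s[k]), ?_, by rw [← htoks]⟩
      rw [PySem.List.mem_enumerate_iff]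
      exact ⟨k, hk, by simp⟩
    rw [PySem.Dict.getD_of_mem_items _ hmem (pv_keys_nodup s f off)]
    rw [hw]
    rw [List.getElem!_eq_getElem?_getD, List.getElem?_eq_getElem hk]
    simp
  | none =>
    cases h2 : pvMatchPlaceholder tok "<field_" f 0 with
    | some w =>
      obtain ⟨j, hj, hw, htok⟩ := pv_key_of_match tok "<field_" f 0 (by omega) w h2
      have htoks : tok = pvFldKey ((j : Int), f[j]) := by
        rw [← String.toList_inj]
        rw [htok, pvFldKey]
        rw [pv_toList_key "<field_" ((j : Int) + 0) (by omega)]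
      have hmem : (tok, f[j]) ∈ (pvTheDict s f off).items := by
        rw [pv_items_theDict s f off hoff0]
        apply List.mem_append_right
        apply List.mem_map.mpr
        refine ⟨((j : Int), f[j]), ?_, by rw [← htoks]⟩
        rw [PySem.List.mem_enumerate_iff]
        exact ⟨j, hj, by simp⟩
      rw [PySem.Dict.getD_of_mem_items _ hmem (pv_keys_nodup s f off)]
      rw [hw]
      rw [List.getElem!_eq_getElem?_getD, List.getElem?_eq_getElem hj]
      simp
    | none =>
      have hnc : (pvTheDict s f off).contains tok = false := by
        rw [PySem.Dict.contains_eq_decide_mem_keys]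
        simp only [decide_eq_false_iff_not]
        intro hmem
        have hkeys : (pvTheDict s f off).keys = ((pvTheDict s f off).items).map Prod.fst := rfl
        rw [hkeys, pv_items_theDict s f off hoff0] at hmem
        rw [List.map_append, List.mem_append] at hmem
        rcases hmem with hmem | hmem
        · rw [List.map_map, List.mem_map] at hmem
          obtain ⟨p, hp, hpe⟩ := hmem
          obtain ⟨k, hk, hpe2⟩ := (PySem.List.mem_enumerate_iff s 0 p).mp hp
          have : pvMatchPlaceholder tok "<src_" s off = some s[k] := by
            apply pv_match_of_key tok "<src_" s off hoff0 k hk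
            rw [← hpe]
            rw [hpe2]
            simp only [Function.comp]
            rw [pvSrcKey]
            rw [pv_toList_key "<src_" _ (by omega)]
            simp
          rw [h1] at this
          simp at this
        · rw [List.map_map, List.mem_map] at hmem
          obtain ⟨p, hp, hpe⟩ := hmem
          obtain ⟨j, hj, hpe2⟩ := (PySem.List.mem_enumerate_iff f 0 p).mp hp
          have : pvMatchPlaceholder tok "<field_" f 0 = some f[j] := by
            apply pv_match_of_key tok "<field_" f 0 (by omega) j hj
            rw [← hpe]
            rw [hpe2]
            simp only [Function.comp]
            rw [pvFldKey]
            rw [pv_toList_key "<field_" _ (by omega)]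
            simp
          rw [h2] at this
          simp at this
      rw [PySem.Dict.getD_of_not_contains _ _ hnc]
      rfl

-- ===== VERDICT (by name: the statement is the Claim_ definition above) =====
theorem restore_field_copy_example_spec : Claim_equal_restore_field_copy_example := by
  intro field_values src tgt has_sos _
  unfold Spec_restore_field_copy_example
  have hoff : (if has_sos then (1 : Int) else 0) = 0 ∨ (if has_sos then (1 : Int) else 0) = 1 := by
    cases has_sos <;> simp
  cases field_values with
  | none =>
    show PySem.Str.join " " ((PySem.Str.split₀ tgt).map
        (fun w => (pvTheDict (PySem.Str.split₀ src) [] (if has_sos then 1 else 0)).getD w w))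
      = restore_field_copy_example_alt none src tgt has_sos
    have hB : restore_field_copy_example_alt none src tgt has_sos
        = PySem.Str.join " " ((PySem.Str.split₀ tgt).map (fun tok =>
            (Option.getD (match pvMatchPlaceholder tok "<src_" (PySem.Str.split₀ src) (if has_sos then 1 else 0),
                (none : Option (List String)) with
              | none, some fw => pvMatchPlaceholder tok "<field_" fw 0
              | r, _ => r) tok))) := by
      show PySem.Str.join " " ((PySem.Str.split₀ tgt).foldl (fun acc tok => acc ++
          [(Option.getD (match pvMatchPlaceholder tok "<src_" (PySem.Str.split₀ src) (if has_sos then 1 else 0),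
              (none : Option (List String)) with
            | none, some fw => pvMatchPlaceholder tok "<field_" fw 0
            | r, _ => r) tok)]) []) = _
      rw [PySem.List.foldl_append_singleton_eq_map]
      rfl
    rw [hB]
    congr 1
    apply List.map_congr_left
    intro tok _
    rw [pv_token_eq (PySem.Str.split₀ src) [] (if has_sos then 1 else 0) hoff tok]
    cases hr : pvMatchPlaceholder tok "<src_" (PySem.Str.split₀ src) (if has_sos then 1 else 0) with
    | some w => rfl
    | none => rw [pv_match_nil]
  | some fv =>
    show PySem.Str.join " " ((PySem.Str.split₀ tgt).map
        (fun w => (pvTheDict (PySem.Str.split₀ src) (PySem.Str.split₀ fv) (if has_sos then 1 else 0)).getD w w))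
      = restore_field_copy_example_alt (some fv) src tgt has_sos
    have hB : restore_field_copy_example_alt (some fv) src tgt has_sos
        = PySem.Str.join " " ((PySem.Str.split₀ tgt).map (fun tok =>
            (Option.getD (match pvMatchPlaceholder tok "<src_" (PySem.Str.split₀ src) (if has_sos then 1 else 0),
                (some (PySem.Str.split₀ fv) : Option (List String)) with
              | none, some fw => pvMatchPlaceholder tok "<field_" fw 0
              | r, _ => r) tok))) := by
      show PySem.Str.join " " ((PySem.Str.split₀ tgt).foldl (fun acc tok => acc ++
          [(Option.getD (match pvMatchPlaceholder tok "<src_" (PySem.Str.split₀ src) (if has_sos then 1 else 0),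
              (some (PySem.Str.split₀ fv) : Option (List String)) with
            | none, some fw => pvMatchPlaceholder tok "<field_" fw 0
            | r, _ => r) tok)]) []) = _
      rw [PySem.List.foldl_append_singleton_eq_map]
      rfl
    rw [hB]
    congr 1
    apply List.map_congr_left
    intro tok _
    rw [pv_token_eq (PySem.Str.split₀ src) (PySem.Str.split₀ fv) (if has_sos then 1 else 0) hoff tok]
    cases hr : pvMatchPlaceholder tok "<src_" (PySem.Str.split₀ src) (if has_sos then 1 else 0) with
    | some w => rfl
    | none => rfl
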